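-- pv_equiv track=rewrite | github.com/briagd/Image-Classifier | pytorch_cnn/preprocessing.py | category_count
-- ===== SOURCE A (Python) =====
-- def category_count(files_labels_dict,labels):
--     cat_count = {}
--     counts = [0 for _ in labels]
--     for val in files_labels_dict.values():
--         for i in range(len(labels)):
--             counts[i] += val[i]
--     for i in range(len(labels)):
--         cat_count[labels[i]] = counts[i]
--     return cat_count
-- ===== SOURCE B (Python) =====
-- def category_count(files_labels_dict, labels):
--     vals = files_labels_dict.values()
--     return {labels[i]: sum(val[i] for val in vals) for i in range(len(labels))}
-- ===== Notes on version B (the rewrite author's own statement) =====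
-- stated objective: simpler
-- what changed: Replaces the streaming accumulator pass (mutable counts vector updated per dict value, then zipped back into a dict) by a direct dict comprehension that, for each label index, sums that column across the dict values.
import Mathlib
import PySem

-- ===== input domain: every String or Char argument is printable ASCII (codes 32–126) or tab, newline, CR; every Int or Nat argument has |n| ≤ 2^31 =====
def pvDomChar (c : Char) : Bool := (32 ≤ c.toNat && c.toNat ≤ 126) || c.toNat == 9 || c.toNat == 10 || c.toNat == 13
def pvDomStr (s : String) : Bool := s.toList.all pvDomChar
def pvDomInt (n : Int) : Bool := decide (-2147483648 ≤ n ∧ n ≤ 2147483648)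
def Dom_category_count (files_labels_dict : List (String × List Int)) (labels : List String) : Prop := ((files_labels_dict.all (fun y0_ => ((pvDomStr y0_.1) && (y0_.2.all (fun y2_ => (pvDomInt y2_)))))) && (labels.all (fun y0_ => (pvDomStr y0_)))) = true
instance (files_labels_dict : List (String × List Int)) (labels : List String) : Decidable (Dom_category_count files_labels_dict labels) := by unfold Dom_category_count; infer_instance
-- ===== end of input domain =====

-- B replaces A's accumulating counts vector + zip-back loop by a dict comprehension
-- summing each label's column directly; equivalence of the return value is proved below.

-- ===== PORT A =====
def category_count (files_labels_dict : List (String × List Int)) (labels : List String) : List (String × Int) :=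
  -- counts = [0 for _ in labels]
  let counts0 : List Int := labels.map (fun _ => 0)
  -- for val in files_labels_dict.values(): for i in range(len(labels)): counts[i] += val[i]
  let counts : List Int := files_labels_dict.foldl
    (fun c p =>
      (PySem.List.pyRange 0 (labels.length : Int) 1).foldl
        (fun c i => PySem.List.pySetD c i (PySem.List.pyGetD c i 0 + PySem.List.pyGetD p.2 i 0)) c)
    counts0
  -- for i in range(len(labels)): cat_count[labels[i]] = counts[i]
  ((PySem.List.pyRange 0 (labels.length : Int) 1).foldl
     (fun (d : PySem.Dict String Int) i =>
        d.insert (PySem.List.pyGetD labels i "") (PySem.List.pyGetD counts i 0))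
     PySem.Dict.empty).items

-- ===== PORT B =====
def category_count_alt (files_labels_dict : List (String × List Int)) (labels : List String) : List (String × Int) :=
  -- {labels[i]: sum(val[i] for val in vals) for i in range(len(labels))}
  ((PySem.List.pyRange 0 (labels.length : Int) 1).foldl
     (fun (d : PySem.Dict String Int) i =>
        d.insert (PySem.List.pyGetD labels i "")
          (files_labels_dict.foldl (fun s p => s + PySem.List.pyGetD p.2 i 0) 0))
     PySem.Dict.empty).items

-- ===== PRECONDITION & SPEC =====
-- Pre_ excludes exactly the inputs where Python raises IndexError: some dict value
-- shorter than labels (then val[i] is out of range; both A and B raise there).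
def Pre_category_count (files_labels_dict : List (String × List Int)) (labels : List String) : Prop :=
  ∀ p ∈ files_labels_dict, labels.length ≤ p.2.length
instance (files_labels_dict : List (String × List Int)) (labels : List String) : Decidable (Pre_category_count files_labels_dict labels) := by unfold Pre_category_count; infer_instance
def pvWitness_category_count : (List (String × List Int)) × List String :=
  ([("a", [1, 2]), ("b", [3, 4])], ["x", "y"])

def Spec_category_count (files_labels_dict : List (String × List Int)) (labels : List String) (out : List (String × Int)) : Prop := out = category_count_alt files_labels_dict labels
instance (files_labels_dict : List (String × List Int)) (labels : List String) (out : List (String × Int)) : Decidable (Spec_category_count files_labels_dict labels out) := by unfold Spec_category_count; infer_instance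

-- ===== CLAIM (what is proved, stated in full; the proofs are below) =====
def Claim_equal_category_count : Prop := ∀ (files_labels_dict : List (String × List Int)) (labels : List String), Dom_category_count files_labels_dict labels → Pre_category_count files_labels_dict labels → Spec_category_count files_labels_dict labels (category_count files_labels_dict labels)

-- ===== LEMMAS AND PROOFS =====

-- length is preserved by A's inner loop
theorem pv_len_inner (val : List Int) (l : List Int) (c : List Int) :
    (l.foldl (fun c i => PySem.List.pySetD c i (PySem.List.pyGetD c i 0 + PySem.List.pyGetD val i 0)) c).length = c.length := by
  induction l generalizing c with
  | nil => rfl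
  | cons x xs ih => simp [List.foldl, ih, PySem.List.length_pySetD]

-- effect of A's inner loop on entry j (j < n ≤ c.length): add val[j]
theorem pv_get_inner (val : List Int) (n : ℕ) (c : List Int) (hn : n ≤ c.length)
    (j : ℕ) (hj : j < c.length) :
    PySem.List.pyGetD ((PySem.List.pyRange 0 (n : Int) 1).foldl
      (fun c i => PySem.List.pySetD c i (PySem.List.pyGetD c i 0 + PySem.List.pyGetD val i 0)) c) (j : Int) 0
    = PySem.List.pyGetD c (j : Int) 0 + (if j < n then PySem.List.pyGetD val (j : Int) 0 else 0) := by
  induction n with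
  | zero => simp [PySem.List.pyRange]
  | succ m ih =>
    have hb : (0 : Int) ≤ (m : Int) := by positivity
    have hcast : ((m + 1 : ℕ) : Int) = (m : Int) + 1 := by push_cast; ring
    rw [hcast, PySem.List.pyRange_one_succ_right hb, List.foldl_append]
    have hm : m ≤ c.length := Nat.le_of_succ_le hn
    have hlen := pv_len_inner val (PySem.List.pyRange 0 (m : Int) 1) c
    simp only [List.foldl]
    by_cases hjm : j = m
    · subst hjm
      rw [PySem.List.pyGetD_natCast, PySem.List.pySetD_natCast]
      rw [List.getD_eq_getElem?_getD, List.getElem?_set_self (by omega)]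
      rw [ih hm, PySem.List.pyGetD_natCast]
      simp [List.getD_eq_getElem?_getD, List.getElem?_eq_getElem (by omega : j < c.length)]
    · rw [PySem.List.pyGetD_natCast, PySem.List.pySetD_natCast]
      rw [List.getD_eq_getElem?_getD, List.getElem?_set_ne (by omega)]
      rw [← List.getD_eq_getElem?_getD, ← PySem.List.pyGetD_natCast, ih hm]
      have : (j < m + 1) = (j < m) := by
        apply propext; constructor <;> intro h <;> omega
      simp [this]

-- A's outer loop computes, at each entry j < labels.length, the column sum of the dict values
theorem pv_outer (d : List (String × List Int)) (n : ℕ) (c : List Int) (hc : c.length = n)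
    (j : ℕ) (hj : j < n) :
    PySem.List.pyGetD (d.foldl
      (fun c p => (PySem.List.pyRange 0 (n : Int) 1).foldl
        (fun c i => PySem.List.pySetD c i (PySem.List.pyGetD c i 0 + PySem.List.pyGetD p.2 i 0)) c) c) (j : Int) 0
    = PySem.List.pyGetD c (j : Int) 0 + d.foldl (fun s p => s + PySem.List.pyGetD p.2 (j : Int) 0) 0 := by
  induction d generalizing c with
  | nil => simp
  | cons p ps ih =>
    simp only [List.foldl]
    have hlen := pv_len_inner p.2 (PySem.List.pyRange 0 (n : Int) 1) c
    rw [ih _ (by omega)]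
    rw [pv_get_inner p.2 n c (by omega) j (by omega)]
    rw [PySem.List.foldl_add, PySem.List.foldl_add]
    simp [hj]
    ring

-- ===== VERDICT (by name: the statement is the Claim_ definition above) =====
theorem category_count_spec : Claim_equal_category_count := by
  intro d labels _ _
  unfold Spec_category_count category_count category_count_alt
  dsimp only
  congr 1
  apply PySem.List.foldl_congr_mem
  intro acc i hi
  rw [PySem.List.mem_pyRange_one] at hi
  congr 1
  obtain ⟨h0, hn⟩ := hi
  have hij : i = ((i.toNat : ℕ) : Int) := by omega
  rw [hij]
  rw [pv_outer d labels.length (labels.map (fun _ => 0)) (by simp) i.toNat (by omega)]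
  rw [PySem.List.pyGetD_natCast]
  simp [List.getD_eq_getElem?_getD]
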